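-- pv_equiv track=rewrite | github.com/OvidioVidal/INTELLIGENCE_TOOL | classifier.py | _determine_fund_type
-- ===== SOURCE A (Python) =====
-- from typing import Dict, List, Tuple, Optional
--
-- def _determine_fund_type(fund_lower: str, reasons: List[str]) -> str:
--
--     if any('spv' in reason.lower() or 'co-invest' in reason.lower() for reason in reasons):
--         return "special_purpose"
--     elif any('bid' in reason.lower() or 'top' in reason.lower() for reason in reasons):
--         return "pe_acquisition"
--     elif any('ventures' in fund_lower for term in ['ventures', 'venture']):
--         return "venture_capital"
--     elif 'growth' in fund_lower:
--         return "growth_capital"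
--     elif 'buyout' in fund_lower:
--         return "buyout"
--     elif any(term in fund_lower for term in ['real estate', 'reit']):
--         return "real_estate"
--     elif any(term in fund_lower for term in ['infrastructure', 'energy']):
--         return "infrastructure"
--     else:
--         return "general_pe"
-- ===== SOURCE B (Python) =====
-- _FUND_KWS = [('ventures',), ('growth',), ('buyout',),
--              ('real estate', 'reit'), ('infrastructure', 'energy')]
-- _FUND_LABELS = ['venture_capital', 'growth_capital', 'buyout',
--                 'real_estate', 'infrastructure', 'general_pe']
--
--
-- def _determine_fund_type(fund_lower, reasons):
--     # One fused pass over the reasons, tracking both reason-rule flags at once.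
--     saw_sp = saw_bid = False
--     for r in reasons:
--         rl = r.lower()
--         saw_sp = saw_sp or 'spv' in rl or 'co-invest' in rl
--         saw_bid = saw_bid or 'bid' in rl or 'top' in rl
--     if saw_sp:
--         return 'special_purpose'
--     if saw_bid:
--         return 'pe_acquisition'
--     # Evaluate every fund keyword rule, then pick the highest-priority match.
--     matched = [i for i, kws in enumerate(_FUND_KWS)
--                if any(k in fund_lower for k in kws)]
--     return _FUND_LABELS[min(matched, default=len(_FUND_LABELS) - 1)]
-- ===== Notes on version B (the rewrite author's own statement) =====
-- stated objective: alternative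
-- what changed: A makes staged passes (two separate any() scans over reasons, each lowercasing every reason, then a short-circuiting if/elif over fund keywords); B does one fused pass over reasons accumulating both flags, then evaluates all fund keyword rules, collects the indices of every match and selects the minimum-index label, relying on the fact that first-match order equals min priority.
import Mathlib
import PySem

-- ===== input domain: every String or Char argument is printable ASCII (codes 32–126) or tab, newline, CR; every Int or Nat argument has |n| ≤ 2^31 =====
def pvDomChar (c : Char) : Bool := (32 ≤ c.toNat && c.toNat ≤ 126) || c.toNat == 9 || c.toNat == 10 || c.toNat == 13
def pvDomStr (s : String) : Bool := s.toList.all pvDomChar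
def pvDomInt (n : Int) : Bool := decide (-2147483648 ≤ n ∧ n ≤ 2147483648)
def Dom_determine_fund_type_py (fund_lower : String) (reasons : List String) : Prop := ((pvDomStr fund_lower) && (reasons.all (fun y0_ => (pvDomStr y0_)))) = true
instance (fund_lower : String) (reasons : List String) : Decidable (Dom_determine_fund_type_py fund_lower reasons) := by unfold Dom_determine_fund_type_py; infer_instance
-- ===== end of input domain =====

-- B replaces A's staged short-circuit cascade by one fused pass over reasons with two boolean
-- accumulators plus evaluate-all-fund-rules-then-pick-min-index selection (alternative, same cost).

-- ===== PORT A =====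
def determine_fund_type_py (fund_lower : String) (reasons : List String) : String :=
  if reasons.any (fun reason => PySem.Str.isIn "spv" (PySem.Str.lower reason) || PySem.Str.isIn "co-invest" (PySem.Str.lower reason)) then
    "special_purpose"
  else if reasons.any (fun reason => PySem.Str.isIn "bid" (PySem.Str.lower reason) || PySem.Str.isIn "top" (PySem.Str.lower reason)) then
    "pe_acquisition"
  else if (["ventures", "venture"] : List String).any (fun _term => PySem.Str.isIn "ventures" fund_lower) then
    "venture_capital"
  else if PySem.Str.isIn "growth" fund_lower then
    "growth_capital"
  else if PySem.Str.isIn "buyout" fund_lower then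
    "buyout"
  else if (["real estate", "reit"] : List String).any (fun term => PySem.Str.isIn term fund_lower) then
    "real_estate"
  else if (["infrastructure", "energy"] : List String).any (fun term => PySem.Str.isIn term fund_lower) then
    "infrastructure"
  else
    "general_pe"

-- ===== PORT B =====
def pvFundKws : List (List String) :=
  [["ventures"], ["growth"], ["buyout"], ["real estate", "reit"], ["infrastructure", "energy"]]

def pvFundLabels : List String :=
  ["venture_capital", "growth_capital", "buyout", "real_estate", "infrastructure", "general_pe"]

def determine_fund_type_py_alt (fund_lower : String) (reasons : List String) : String :=
  -- one fused pass over reasons, accumulating both flags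
  let st := reasons.foldl (fun (st : Bool × Bool) r =>
      let rl := PySem.Str.lower r
      (st.1 || PySem.Str.isIn "spv" rl || PySem.Str.isIn "co-invest" rl,
       st.2 || PySem.Str.isIn "bid" rl || PySem.Str.isIn "top" rl)) (false, false)
  if st.1 then "special_purpose"
  else if st.2 then "pe_acquisition"
  else
    -- indices of ALL matching fund keyword rules, then the minimum-index label
    let matched := (PySem.List.enumerate pvFundKws).filterMap (fun p =>
        if p.2.any (fun k => PySem.Str.isIn k fund_lower) then some p.1 else none)
    let idx : Int := match PySem.List.min? matched (fun i => i) with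
      | some i => i
      | none => (pvFundLabels.length : Int) - 1
    -- idx ∈ [0,5], so the Python index never raises; pyGet? is exact there
    ((PySem.List.pyGet? pvFundLabels idx).getD "")

-- ===== PRECONDITION & SPEC =====
def Spec_determine_fund_type_py (fund_lower : String) (reasons : List String) (out : String) : Prop := out = determine_fund_type_py_alt fund_lower reasons
instance (fund_lower : String) (reasons : List String) (out : String) : Decidable (Spec_determine_fund_type_py fund_lower reasons out) := by unfold Spec_determine_fund_type_py; infer_instance

-- ===== CLAIM (what is proved, stated in full; the proofs are below) =====
def Claim_equal_determine_fund_type_py : Prop := ∀ (fund_lower : String) (reasons : List String), Dom_determine_fund_type_py fund_lower reasons → Spec_determine_fund_type_py fund_lower reasons (determine_fund_type_py fund_lower reasons)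

-- ===== LEMMAS AND PROOFS =====

-- the fused fold computes exactly the two staged `any`s of A
theorem pvFold_eq (reasons : List String) (a b : Bool) :
    reasons.foldl (fun (st : Bool × Bool) r =>
      let rl := PySem.Str.lower r
      (st.1 || PySem.Str.isIn "spv" rl || PySem.Str.isIn "co-invest" rl,
       st.2 || PySem.Str.isIn "bid" rl || PySem.Str.isIn "top" rl)) (a, b)
    = (a || reasons.any (fun r => PySem.Str.isIn "spv" (PySem.Str.lower r) || PySem.Str.isIn "co-invest" (PySem.Str.lower r)),
       b || reasons.any (fun r => PySem.Str.isIn "bid" (PySem.Str.lower r) || PySem.Str.isIn "top" (PySem.Str.lower r))) := by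
  induction reasons generalizing a b with
  | nil => simp
  | cons r rs ih =>
    simp only [List.foldl_cons, List.any_cons]
    rw [ih]
    simp [Bool.or_assoc]

-- the fund-keyword part: A's short-circuit cascade equals B's collect-all-matches + min index
theorem pvFund_eq (f : String) :
    (if (["ventures", "venture"] : List String).any (fun _term => PySem.Str.isIn "ventures" f) then "venture_capital"
     else if PySem.Str.isIn "growth" f then "growth_capital"
     else if PySem.Str.isIn "buyout" f then "buyout"
     else if (["real estate", "reit"] : List String).any (fun term => PySem.Str.isIn term f) then "real_estate"
     else if (["infrastructure", "energy"] : List String).any (fun term => PySem.Str.isIn term f) then "infrastructure"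
     else "general_pe")
    = (let matched := (PySem.List.enumerate pvFundKws).filterMap (fun p =>
          if p.2.any (fun k => PySem.Str.isIn k f) then some p.1 else none)
       let idx : Int := match PySem.List.min? matched (fun i => i) with
         | some i => i
         | none => (pvFundLabels.length : Int) - 1
       ((PySem.List.pyGet? pvFundLabels idx).getD "")) := by
  simp only [pvFundKws, pvFundLabels, PySem.List.enumerate_cons, PySem.List.enumerate_nil,
    List.filterMap_cons, List.filterMap_nil, List.any_cons, List.any_nil, Bool.or_false]
  generalize PySem.Str.isIn "ventures" f = b1
  generalize PySem.Str.isIn "growth" f = b2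
  generalize PySem.Str.isIn "buyout" f = b3
  generalize PySem.Str.isIn "real estate" f = b4
  generalize PySem.Str.isIn "reit" f = b5
  generalize PySem.Str.isIn "infrastructure" f = b6
  generalize PySem.Str.isIn "energy" f = b7
  revert b1 b2 b3 b4 b5 b6 b7
  decide

-- ===== VERDICT (by name: the statement is the Claim_ definition above) =====
theorem determine_fund_type_py_spec : Claim_equal_determine_fund_type_py := by
  intro fund_lower reasons _
  unfold Spec_determine_fund_type_py determine_fund_type_py determine_fund_type_py_alt
  simp only [pvFold_eq, Bool.false_or]
  simp only [pvFund_eq]
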